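-- pv_equiv track=rewrite | github.com/MarkHofstetter/python-kurs | laengster_namen.py | getShortestElements
-- ===== SOURCE A (Python) =====
-- def getShortestElements(liste):
--   minLength = float('inf')
--   minLengthElements = []
--   for element in liste:
--     if len(element) < minLength:
--       minLengthElements = [element]
--       minLength = len(element)
--     elif len(element) == minLength:
--       minLengthElements.append(element)
--   return (minLength, minLengthElements)
-- ===== SOURCE B (Python) =====
-- def getShortestElements(liste):
--   m = min(len(e) for e in liste)
--   return (m, [e for e in liste if len(e) == m])
-- ===== Notes on version B (the rewrite author's own statement) =====
-- stated objective: simpler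
-- what changed: B replaces A's single-pass running-minimum with incremental tie-list rebuilding by 'compute the minimum length first, then filter the ties' in two plain passes.
-- outside the precondition, e.g. on getShortestElements([]): A returns (inf, []), B raises ValueError
import Mathlib
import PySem

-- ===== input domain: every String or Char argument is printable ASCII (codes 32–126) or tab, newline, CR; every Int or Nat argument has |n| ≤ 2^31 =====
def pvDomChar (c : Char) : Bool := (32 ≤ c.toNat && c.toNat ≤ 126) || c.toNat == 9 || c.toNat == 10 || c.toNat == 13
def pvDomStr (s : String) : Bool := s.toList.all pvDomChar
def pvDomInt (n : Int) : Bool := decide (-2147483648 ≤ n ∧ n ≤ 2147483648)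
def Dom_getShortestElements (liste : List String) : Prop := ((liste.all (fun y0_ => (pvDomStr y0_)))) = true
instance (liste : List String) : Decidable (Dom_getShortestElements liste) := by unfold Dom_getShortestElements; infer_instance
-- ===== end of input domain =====

-- B computes the minimum length first, then filters the ties: simpler two-pass decomposition.


-- ===== PORT A =====
-- float('inf') is modelled as 'none' in the running-minimum state: every finite
-- length compares below it, exactly as in Python; Pre_ excludes the empty list,
-- on which A's first component stays the float inf (not an int).
def getShortestElementsLoop (s : Option Int × List String) (element : String) :
    Option Int × List String :=
  match s.1 with
  | none => (some (PySem.Str.len element), [element])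
  | some m =>
    if PySem.Str.len element < m then (some (PySem.Str.len element), [element])
    else if PySem.Str.len element = m then (s.1, s.2 ++ [element])
    else s

def getShortestElements (liste : List String) : Int × List String :=
  let st := liste.foldl getShortestElementsLoop (none, [])
  (st.1.getD 0, st.2)

-- ===== PORT B =====
def getShortestElements_alt (liste : List String) : Int × List String :=
  let m := (PySem.List.min? (liste.map (fun e => PySem.Str.len e)) (fun x => x)).getD 0
  (m, liste.filter (fun e => PySem.Str.len e = m))

-- ===== PRECONDITION & SPEC =====
-- Pre_ excludes only the empty list, on which A returns (float('inf'), []) — a float,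
-- not a value of the declared Int type — while B's min() raises ValueError.
def Pre_getShortestElements (liste : List String) : Prop := liste ≠ []
instance (liste : List String) : Decidable (Pre_getShortestElements liste) := by unfold Pre_getShortestElements; infer_instance
def pvWitness_getShortestElements : List String := ["ab", "c"]

def Spec_getShortestElements (liste : List String) (out : Int × List String) : Prop := out = getShortestElements_alt liste
instance (liste : List String) (out : Int × List String) : Decidable (Spec_getShortestElements liste out) := by unfold Spec_getShortestElements; infer_instance

-- ===== CLAIM (what is proved, stated in full; the proofs are below) =====
def Claim_equal_getShortestElements : Prop := ∀ (liste : List String), Dom_getShortestElements liste → Pre_getShortestElements liste → Spec_getShortestElements liste (getShortestElements liste)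

-- ===== LEMMAS AND PROOFS =====

theorem foldl_min_le (t : List String) (m₀ : Int) :
    t.foldl (fun a e => min a (PySem.Str.len e)) m₀ ≤ m₀ := by
  induction t generalizing m₀ with
  | nil => simp
  | cons y ys ihy =>
    simp only [List.foldl_cons]
    exact le_trans (ihy _) (min_le_left _ _)

-- Invariant of A's loop once the running minimum is finite.
theorem loopA_spec (xs : List String) : ∀ (m : Int) (acc : List String),
    xs.foldl getShortestElementsLoop (some m, acc) =
      (some (xs.foldl (fun a e => min a (PySem.Str.len e)) m),
       (if xs.foldl (fun a e => min a (PySem.Str.len e)) m < m then ([] : List String) else acc)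
         ++ xs.filter (fun e => PySem.Str.len e = xs.foldl (fun a e => min a (PySem.Str.len e)) m)) := by
  induction xs with
  | nil => intro m acc; simp
  | cons e t ih =>
    intro m acc
    by_cases h1 : PySem.Str.len e < m
    · have hstep : getShortestElementsLoop (some m, acc) e = (some (PySem.Str.len e), [e]) := by
        simp only [getShortestElementsLoop]; rw [if_pos h1]
      rw [List.foldl_cons, hstep, ih]
      have hme : min m (PySem.Str.len e) = PySem.Str.len e := min_eq_right (le_of_lt h1)
      simp only [List.foldl_cons, hme]
      set M := t.foldl (fun a e => min a (PySem.Str.len e)) (PySem.Str.len e) with hM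
      have hMle : M ≤ PySem.Str.len e := foldl_min_le t _
      have hMm : M < m := lt_of_le_of_lt hMle h1
      rw [if_pos hMm]
      by_cases h2 : M < PySem.Str.len e
      · rw [if_pos h2]
        have hne : ¬ (PySem.Str.len e = M) := by omega
        rw [PySem.Str.len_eq, String.length_toList] at hne
        simp [hne]
      · have hx : PySem.Str.len e = M := by omega
        rw [if_neg h2]
        rw [PySem.Str.len_eq, String.length_toList] at hx
        simp [hx]
    · by_cases h2 : PySem.Str.len e = m
      · have hstep : getShortestElementsLoop (some m, acc) e = (some m, acc ++ [e]) := by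
          simp only [getShortestElementsLoop]; rw [if_neg h1, if_pos h2]
        rw [List.foldl_cons, hstep, ih]
        have hme : min m (PySem.Str.len e) = m := by omega
        simp only [List.foldl_cons, hme]
        set M := t.foldl (fun a e => min a (PySem.Str.len e)) m with hM
        have hMle : M ≤ m := foldl_min_le t _
        by_cases h3 : M < m
        · rw [if_pos h3, if_pos h3]
          have hne : ¬ (PySem.Str.len e = M) := by omega
          rw [PySem.Str.len_eq, String.length_toList] at hne
          simp [hne]
        · have hMm : M = m := by omega
          rw [if_neg h3, if_neg h3]
          have hEq : PySem.Str.len e = M := by omega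
          rw [PySem.Str.len_eq, String.length_toList] at hEq
          simp [hEq]
      · have hstep : getShortestElementsLoop (some m, acc) e = (some m, acc) := by
          simp only [getShortestElementsLoop]; rw [if_neg h1, if_neg h2]
        rw [List.foldl_cons, hstep, ih]
        have hme : min m (PySem.Str.len e) = m := by omega
        simp only [List.foldl_cons, hme]
        set M := t.foldl (fun a e => min a (PySem.Str.len e)) m with hM
        have hMle : M ≤ m := foldl_min_le t _
        have hne : ¬ (PySem.Str.len e = M) := by omega
        rw [PySem.Str.len_eq, String.length_toList] at hne
        simp [hne]

-- ===== VERDICT (by name: the statement is the Claim_ definition above) =====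
theorem getShortestElements_spec : Claim_equal_getShortestElements := by
  intro liste _ hpre
  unfold Spec_getShortestElements
  match liste with
  | [] => exact absurd rfl hpre
  | x :: t =>
    unfold getShortestElements getShortestElements_alt
    have hstep : getShortestElementsLoop (none, []) x = (some (PySem.Str.len x), [x]) := rfl
    rw [List.foldl_cons, hstep, loopA_spec t (PySem.Str.len x) [x]]
    rw [List.map_cons, PySem.List.min?_id_cons]
    have hfold : (t.map (fun e => PySem.Str.len e)).foldl min (PySem.Str.len x)
        = t.foldl (fun a e => min a (PySem.Str.len e)) (PySem.Str.len x) := by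
      rw [List.foldl_map]
    rw [hfold]
    set M := t.foldl (fun a e => min a (PySem.Str.len e)) (PySem.Str.len x) with hM
    have hMle : M ≤ PySem.Str.len x := foldl_min_le t _
    simp only [Option.getD_some]
    by_cases h : M < PySem.Str.len x
    · rw [if_pos h]
      have hne : ¬ (PySem.Str.len x = M) := by omega
      rw [PySem.Str.len_eq, String.length_toList] at hne
      simp [hne]
    · have hx : PySem.Str.len x = M := by omega
      rw [if_neg h]
      rw [PySem.Str.len_eq, String.length_toList] at hx
      simp [hx]
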